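-- pv_equiv track=rewrite | github.com/RimorRes/NSI-Minesweeper | minesweeper/minesweeper.py | delimit_start_area
-- ===== SOURCE A (Python) =====
-- def delimit_start_area(start_x, start_y, width, height, radius=1):
--     area = []
--     for vert in range(-radius, radius + 1):
--         for horz in range(-radius, radius + 1):
--             x = start_x + horz
--             y = start_y + vert
--             if (0 <= x < width) and (0 <= y < height):
--                 area.append([x, y])
--     return area
-- ===== SOURCE B (Python) =====
-- def delimit_start_area(start_x, start_y, width, height, radius=1):
--     # Single flat loop over cell indices of the clipped rectangle; (x, y) is
--     # decoded from the index by divmod, so there are no nested loops and no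
--     # bounds check per cell.
--     x_lo = max(0, start_x - radius)
--     y_lo = max(0, start_y - radius)
--     nx = min(width, start_x + radius + 1) - x_lo
--     ny = min(height, start_y + radius + 1) - y_lo
--     if nx <= 0 or ny <= 0:
--         return []
--     return [[x_lo + i % nx, y_lo + i // nx] for i in range(nx * ny)]
-- ===== Notes on version B (the rewrite author's own statement) =====
-- stated objective: alternative
-- what changed: B replaces A's nested offset loops with a per-cell bounds filter by one flat loop over the indices 0..nx*ny of the clipped rectangle, decoding each (x, y) from the index with divmod.
import Mathlib
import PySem

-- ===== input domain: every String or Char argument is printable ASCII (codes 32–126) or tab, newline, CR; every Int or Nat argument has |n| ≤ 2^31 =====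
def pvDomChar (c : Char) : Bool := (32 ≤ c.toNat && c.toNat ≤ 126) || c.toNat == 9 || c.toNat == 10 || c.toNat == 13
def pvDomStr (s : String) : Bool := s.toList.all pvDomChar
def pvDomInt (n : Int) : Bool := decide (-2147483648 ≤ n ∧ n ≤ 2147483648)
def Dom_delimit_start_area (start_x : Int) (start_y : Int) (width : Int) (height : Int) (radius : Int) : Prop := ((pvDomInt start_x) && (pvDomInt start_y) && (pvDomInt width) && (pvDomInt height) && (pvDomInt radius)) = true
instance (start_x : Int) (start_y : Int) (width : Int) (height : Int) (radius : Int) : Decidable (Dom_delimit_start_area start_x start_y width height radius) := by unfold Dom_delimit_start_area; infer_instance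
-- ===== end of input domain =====

-- B replaces A's nested offset loops + per-cell bounds filter by one flat loop over the
-- indices of the clipped rectangle, decoding each (x, y) by divmod; objective: alternative.

-- ===== PORT A =====
-- Python's O(1) 'area.append([x, y])' is ported as cons onto the accumulator with one
-- final reverse (the usual fold accumulator for an append loop); everything else is literal.
def delimit_start_area (start_x : Int) (start_y : Int) (width : Int) (height : Int) (radius : Int) : List (List Int) :=
  ((PySem.List.pyRange (-radius) (radius + 1) 1).foldl (fun area vert =>
    (PySem.List.pyRange (-radius) (radius + 1) 1).foldl (fun area horz =>
      let x := start_x + horz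
      let y := start_y + vert
      if 0 ≤ x ∧ x < width ∧ 0 ≤ y ∧ y < height then [x, y] :: area else area) area) []).reverse

-- ===== PORT B =====
def delimit_start_area_alt (start_x : Int) (start_y : Int) (width : Int) (height : Int) (radius : Int) : List (List Int) :=
  let x_lo := max 0 (start_x - radius)
  let y_lo := max 0 (start_y - radius)
  let nx := min width (start_x + radius + 1) - x_lo
  let ny := min height (start_y + radius + 1) - y_lo
  if nx ≤ 0 ∨ ny ≤ 0 then []
  else (PySem.List.pyRange 0 (nx * ny) 1).map
    (fun i => [x_lo + PySem.Int.mod i nx, y_lo + PySem.Int.floordiv i nx])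

-- ===== PRECONDITION & SPEC =====
def Spec_delimit_start_area (start_x : Int) (start_y : Int) (width : Int) (height : Int) (radius : Int) (out : List (List Int)) : Prop := out = delimit_start_area_alt start_x start_y width height radius
instance (start_x : Int) (start_y : Int) (width : Int) (height : Int) (radius : Int) (out : List (List Int)) : Decidable (Spec_delimit_start_area start_x start_y width height radius out) := by unfold Spec_delimit_start_area; infer_instance

-- ===== CLAIM =====
def Claim_equal_delimit_start_area : Prop := ∀ (start_x : Int) (start_y : Int) (width : Int) (height : Int) (radius : Int), Dom_delimit_start_area start_x start_y width height radius → Spec_delimit_start_area start_x start_y width height radius (delimit_start_area start_x start_y width height radius)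

-- ===== LEMMAS AND PROOFS =====

-- Filtering an increasing range by an interval test clips the range.
theorem filter_pyRange_interval (a b lo hi : Int) :
    (PySem.List.pyRange a b 1).filter (fun x => decide (lo ≤ x ∧ x < hi)) =
      PySem.List.pyRange (max a lo) (min b hi) 1 := by
  have hp : (List.filter (fun x => decide (lo ≤ x ∧ x < hi)) (PySem.List.pyRange a b 1)).Perm
      (PySem.List.pyRange (max a lo) (min b hi) 1) := by
    refine (List.perm_ext_iff_of_nodup ((PySem.List.nodup_pyRange_one a b).filter _)
      (PySem.List.nodup_pyRange_one _ _)).mpr ?_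
    intro x
    simp only [List.mem_filter, PySem.List.mem_pyRange_one, decide_eq_true_eq]
    omega
  exact hp.eq_of_pairwise (fun _ _ _ _ h1 h2 => absurd h2 (lt_asymm h1))
    ((PySem.List.pairwise_lt_pyRange_one a b).filter _) (PySem.List.pairwise_lt_pyRange_one _ _)

theorem pyRange_shift (c a b : Int) :
    PySem.List.pyRange (c + a) (c + b) 1 = (PySem.List.pyRange a b 1).map (fun v => c + v) := by
  rw [PySem.List.pyRange_one, PySem.List.pyRange_one]
  have h : (c + b - (c + a)) = b - a := by omega
  rw [h, List.map_map]
  exact List.map_congr_left (fun k _ => by simp [Function.comp]; omega)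

theorem flatMap_if_filter {β : Type} (l : List Int) (p : Int → Prop) [DecidablePred p]
    (g : Int → List β) :
    l.flatMap (fun v => if p v then g v else []) = (l.filter (fun v => decide (p v))).flatMap g := by
  induction l with
  | nil => rfl
  | cons x xs ih =>
      by_cases hx : p x <;> simp [List.flatMap_cons, hx, ih]

-- A cons/reverse fold equals the corresponding append fold.
theorem foldl_rev_rel {α β : Type} (l : List α) (stepR stepA : List β → α → List β)
    (h : ∀ acc v, stepR acc v = (stepA acc.reverse v).reverse) :
    ∀ acc : List β, l.foldl stepR acc = (l.foldl stepA acc.reverse).reverse := by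
  induction l with
  | nil => intro acc; simp
  | cons x xs ih =>
      intro acc
      simp only [List.foldl_cons]
      rw [ih (stepR acc x), h acc x, List.reverse_reverse]

-- A equals the row-by-row enumeration of the clipped rectangle.
theorem delimit_eq_rowform (start_x start_y width height radius : Int) :
    delimit_start_area start_x start_y width height radius =
      (PySem.List.pyRange (max 0 (start_y - radius)) (min height (start_y + radius + 1)) 1).flatMap
        (fun y =>
          (PySem.List.pyRange (max 0 (start_x - radius)) (min width (start_x + radius + 1)) 1).map
            (fun x => [x, y])) := by
  unfold delimit_start_area
  rw [foldl_rev_rel _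
      (fun area vert =>
        (PySem.List.pyRange (-radius) (radius + 1) 1).foldl (fun area horz =>
          let x := start_x + horz
          let y := start_y + vert
          if 0 ≤ x ∧ x < width ∧ 0 ≤ y ∧ y < height then [x, y] :: area else area) area)
      (fun area vert =>
        (PySem.List.pyRange (-radius) (radius + 1) 1).foldl (fun area horz =>
          if 0 ≤ start_x + horz ∧ start_x + horz < width ∧ 0 ≤ start_y + vert ∧ start_y + vert < height
          then area ++ [[start_x + horz, start_y + vert]] else area) area)
      (fun acc vert => foldl_rev_rel _ _ _ (fun a horz => by
        by_cases hc : 0 ≤ start_x + horz ∧ start_x + horz < width ∧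
            0 ≤ start_y + vert ∧ start_y + vert < height
        · simp [hc]
        · simp [hc]) acc) []]
  rw [List.reverse_nil, List.reverse_reverse]
  simp only [PySem.List.foldl_append_ite, PySem.List.foldl_append_eq_flatMap, List.nil_append]
  have inner : ∀ y : Int,
      ((PySem.List.pyRange (-radius) (radius + 1) 1).filter
          (fun horz => decide (0 ≤ start_x + horz ∧ start_x + horz < width ∧ 0 ≤ y ∧ y < height))).map
        (fun horz => [start_x + horz, y]) =
      if 0 ≤ y ∧ y < height then
        (PySem.List.pyRange (max 0 (start_x - radius)) (min width (start_x + radius + 1)) 1).map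
          (fun x => [x, y])
      else [] := by
    intro y
    by_cases hy : 0 ≤ y ∧ y < height
    · rw [if_pos hy]
      have hc : ∀ horz ∈ PySem.List.pyRange (-radius) (radius + 1) 1,
          decide (0 ≤ start_x + horz ∧ start_x + horz < width ∧ 0 ≤ y ∧ y < height) =
          decide ((-start_x) ≤ horz ∧ horz < width - start_x) := by
        intro horz _
        simp only [decide_eq_decide]
        omega
      rw [List.filter_congr hc, filter_pyRange_interval]
      have e1 : max 0 (start_x - radius) = start_x + max (-radius) (-start_x) := by omega
      have e2 : min width (start_x + radius + 1) = start_x + min (radius + 1) (width - start_x) := by omega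
      rw [e1, e2, pyRange_shift, List.map_map]
      rfl
    · rw [if_neg hy]
      rw [List.filter_eq_nil_iff.mpr, List.map_nil]
      intro horz _
      simp only [decide_eq_true_eq]
      omega
  calc (PySem.List.pyRange (-radius) (radius + 1) 1).flatMap
        (fun vert => ((PySem.List.pyRange (-radius) (radius + 1) 1).filter
            (fun horz => decide (0 ≤ start_x + horz ∧ start_x + horz < width ∧
              0 ≤ start_y + vert ∧ start_y + vert < height))).map
          (fun horz => [start_x + horz, start_y + vert]))
      = (PySem.List.pyRange (-radius) (radius + 1) 1).flatMap
          (fun vert => if 0 ≤ start_y + vert ∧ start_y + vert < height then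
              (PySem.List.pyRange (max 0 (start_x - radius)) (min width (start_x + radius + 1)) 1).map
                (fun x => [x, start_y + vert])
            else []) := by
        exact List.flatMap_congr (fun vert _ => inner (start_y + vert))
    _ = ((PySem.List.pyRange (-radius) (radius + 1) 1).filter
          (fun vert => decide (0 ≤ start_y + vert ∧ start_y + vert < height))).flatMap
          (fun vert =>
            (PySem.List.pyRange (max 0 (start_x - radius)) (min width (start_x + radius + 1)) 1).map
              (fun x => [x, start_y + vert])) := by
        exact flatMap_if_filter _ _ _
    _ = (PySem.List.pyRange (max 0 (start_y - radius)) (min height (start_y + radius + 1)) 1).flatMap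
          (fun y =>
            (PySem.List.pyRange (max 0 (start_x - radius)) (min width (start_x + radius + 1)) 1).map
              (fun x => [x, y])) := by
        have hc : ∀ vert ∈ PySem.List.pyRange (-radius) (radius + 1) 1,
            decide (0 ≤ start_y + vert ∧ start_y + vert < height) =
            decide ((-start_y) ≤ vert ∧ vert < height - start_y) := by
          intro vert _
          simp only [decide_eq_decide]
          omega
        rw [List.filter_congr hc, filter_pyRange_interval]
        have e1 : max 0 (start_y - radius) = start_y + max (-radius) (-start_y) := by omega
        have e2 : min height (start_y + radius + 1) = start_y + min (radius + 1) (height - start_y) := by omega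
        rw [e1, e2, pyRange_shift, List.flatMap_map]

-- Row-by-row enumeration of an nx × n rectangle equals the flat divmod-decoded index loop.
theorem rowform_eq_flat (x_lo y_lo nx : Int) (hnx : 0 < nx) (n : Nat) :
    (PySem.List.pyRange y_lo (y_lo + n) 1).flatMap
        (fun y => (PySem.List.pyRange x_lo (x_lo + nx) 1).map (fun x => [x, y])) =
      (PySem.List.pyRange 0 (nx * n) 1).map
        (fun i => [x_lo + PySem.Int.mod i nx, y_lo + PySem.Int.floordiv i nx]) := by
  induction n with
  | zero =>
      simp [PySem.List.pyRange_one_eq_nil]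
  | succ n ih =>
      have hy : PySem.List.pyRange y_lo (y_lo + (n + 1 : Nat)) 1 =
          PySem.List.pyRange y_lo (y_lo + n) 1 ++ [y_lo + n] := by
        have h : (y_lo + ((n : Int) + 1)) = (y_lo + n) + 1 := by ring
        push_cast
        rw [h]
        exact PySem.List.pyRange_one_succ_right (by omega)
      have hr : PySem.List.pyRange 0 (nx * (n + 1 : Nat)) 1 =
          PySem.List.pyRange 0 (nx * n) 1 ++ PySem.List.pyRange (nx * n) (nx * n + nx) 1 := by
        have h : (nx * ((n : Int) + 1)) = nx * n + nx := by ring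
        push_cast
        rw [h]
        exact PySem.List.pyRange_one_append 0 (nx * n) (nx * n + nx)
          (by positivity) (by omega)
      rw [hy, hr, List.flatMap_append, List.map_append, ih]
      congr 1
      have hshift : PySem.List.pyRange (nx * n) (nx * n + nx) 1 =
          (PySem.List.pyRange 0 nx 1).map (fun j => nx * n + j) := by
        have := pyRange_shift (nx * n) 0 nx
        simpa using this
      have hxshift : PySem.List.pyRange x_lo (x_lo + nx) 1 =
          (PySem.List.pyRange 0 nx 1).map (fun j => x_lo + j) := by
        have := pyRange_shift x_lo 0 nx
        simpa using this
      rw [hshift, List.map_map, List.flatMap_cons, List.flatMap_nil, List.append_nil,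
        hxshift, List.map_map]
      refine List.map_congr_left (fun j hj => ?_)
      rw [PySem.List.mem_pyRange_one] at hj
      have hdiv : PySem.Int.floordiv (nx * n + j) nx = n := by
        rw [PySem.Int.floordiv_eq_iff_of_pos hnx]
        constructor
        · rw [mul_comm]; omega
        · have h : ((n : Int) + 1) * nx = nx * n + nx := by ring
          rw [h]; omega
      have hmod : PySem.Int.mod (nx * n + j) nx = j := by
        have h := PySem.Int.floordiv_mul_add_mod (nx * n + j) nx
        rw [hdiv] at h
        have h2 : (n : Int) * nx = nx * n := by ring
        omega
      simp [Function.comp, hdiv, hmod]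

theorem delimit_start_area_eq_alt (start_x start_y width height radius : Int) :
    delimit_start_area start_x start_y width height radius =
      delimit_start_area_alt start_x start_y width height radius := by
  rw [delimit_eq_rowform]
  unfold delimit_start_area_alt
  set x_lo := max 0 (start_x - radius) with hxlo
  set y_lo := max 0 (start_y - radius) with hylo
  set nx := min width (start_x + radius + 1) - x_lo with hnx
  set ny := min height (start_y + radius + 1) - y_lo with hny
  by_cases hdeg : nx ≤ 0 ∨ ny ≤ 0
  · rw [if_pos hdeg]
    rcases hdeg with h | h
    · have hx : PySem.List.pyRange x_lo (min width (start_x + radius + 1)) 1 = [] :=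
        PySem.List.pyRange_one_eq_nil (by omega)
      simp [hx]
    · have hy : PySem.List.pyRange y_lo (min height (start_y + radius + 1)) 1 = [] :=
        PySem.List.pyRange_one_eq_nil (by omega)
      simp [hy]
  · rw [if_neg hdeg]
    rw [not_or, not_le, not_le] at hdeg
    obtain ⟨hnxpos, hnypos⟩ := hdeg
    have hx : min width (start_x + radius + 1) = x_lo + nx := by omega
    have hy : min height (start_y + radius + 1) = y_lo + ny := by omega
    have hn : ny = (ny.toNat : Int) := by omega
    rw [hx, hy, hn]
    have e1 : x_lo + nx - x_lo = nx := by ring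
    have e2 : y_lo + (ny.toNat : Int) - y_lo = (ny.toNat : Int) := by ring
    rw [e1, e2]
    exact rowform_eq_flat x_lo y_lo nx hnxpos ny.toNat

-- ===== VERDICT =====
theorem delimit_start_area_spec : Claim_equal_delimit_start_area := by
  intro start_x start_y width height radius _
  unfold Spec_delimit_start_area
  exact delimit_start_area_eq_alt start_x start_y width height radius
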